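-- pv_equiv track=rewrite | github.com/andreshp/Algorithms | Problems/Coursera/StanfordAlgorithms/Part1/2SumProblem/2sum_extended.py | solution
-- ===== SOURCE A (Python) =====
-- def solution(A):
--
--     limit = 10000
--     number_t = 0
--     # Build a hash table with the elements of A
--     hash_table = {a for a in A}
--
--     for t in range(-limit,limit+1):
--         # For each in A, see if there is b in A such as a+b=t with a != b.
--         # In that case increase number_t and break
--         for a in hash_table:
--             if 2*a != t and t-a in hash_table:
--                 number_t += 1; break
--
--     return number_t
-- ===== SOURCE B (Python) =====
-- def solution(A):
--     # Collect the achievable in-range pairwise sums directly, instead of scanning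
--     # the whole set once for each of the 20001 candidate targets:
--     # sort the distinct values, binary-search each value's in-range partner window,
--     # and stop as soon as every one of the 20001 possible targets is achieved.
--     LIMIT = 10000
--     FULL = 2 * LIMIT + 1
--     vals = sorted(set(A))
--     n = len(vals)
--     sums = set()
--     for i in range(n):
--         a = vals[i]
--         # first index j > i with vals[j] >= -LIMIT - a (hand-rolled bisect_left)
--         lo, hi = i + 1, n
--         while lo < hi:
--             mid = (lo + hi) // 2
--             if vals[mid] < -LIMIT - a:
--                 lo = mid + 1
--             else:
--                 hi = mid
--         while lo < n and vals[lo] <= LIMIT - a: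
--             sums.add(a + vals[lo])
--             lo += 1
--             if len(sums) == FULL:
--                 return FULL
--     return len(sums)
-- ===== Notes on version B (the rewrite author's own statement) =====
-- stated objective: alternative
-- what changed: Instead of scanning the whole value set once for each of the 20001 candidate targets, B sorts the distinct values, binary-searches each value's in-range partner window, collects the achievable pairwise sums in a set, and stops early once all 20001 targets are achieved.
import Mathlib
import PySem

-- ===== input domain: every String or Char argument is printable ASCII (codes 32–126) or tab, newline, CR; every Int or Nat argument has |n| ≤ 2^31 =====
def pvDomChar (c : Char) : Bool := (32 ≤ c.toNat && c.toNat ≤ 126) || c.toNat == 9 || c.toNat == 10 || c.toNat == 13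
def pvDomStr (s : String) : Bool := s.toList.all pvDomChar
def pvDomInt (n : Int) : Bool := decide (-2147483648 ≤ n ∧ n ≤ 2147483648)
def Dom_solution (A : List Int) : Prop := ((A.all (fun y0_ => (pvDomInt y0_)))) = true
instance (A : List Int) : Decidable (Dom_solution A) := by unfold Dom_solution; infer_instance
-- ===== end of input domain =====

-- B replaces A's per-target scan of the whole set (20001 targets) by one pass over the
-- sorted distinct values that collects the achievable in-range pairwise sums (binary-searched
-- partner window per value, early stop once all 20001 targets are achieved).

-- ===== PORT A =====
-- inner 'for a in hash_table: if …: number_t += 1; break' — returns whether the break fired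
def pvInnerA (hs : PySem.Set Int) (t : Int) : List Int → Bool
  | [] => false
  | a :: rest => if 2 * a ≠ t ∧ (t - a) ∈ hs then true else pvInnerA hs t rest

def solution (A : List Int) : Int :=
  let hs : PySem.Set Int := PySem.Set.ofList A
  (PySem.List.pyRange (-10000) (10000 + 1) 1).foldl
    (fun acc t => if pvInnerA hs t hs then acc + 1 else acc) 0

-- ===== PORT B =====
-- hand-rolled bisect_left: 'while lo < hi: mid = (lo+hi)//2; …'; the Nat fuel
-- (initialised to the loop's iteration bound in the wrapper) only makes the loop total
-- (indices are always in range when called, so the total pyGetD with default 0 is exact)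
def pvBisectF : Nat → List Int → Int → Int → Int → Int
  | 0, _, _, lo, _ => lo
  | fuel + 1, vals, target, lo, hi =>
    if lo < hi then
      if PySem.List.pyGetD vals (PySem.Int.floordiv (lo + hi) 2) 0 < target then
        pvBisectF fuel vals target (PySem.Int.floordiv (lo + hi) 2 + 1) hi
      else
        pvBisectF fuel vals target lo (PySem.Int.floordiv (lo + hi) 2)
    else lo

def pvBisect (vals : List Int) (target lo hi : Int) : Int :=
  pvBisectF (hi - lo).toNat vals target lo hi

-- inner 'while lo < n and vals[lo] <= LIMIT - a: …'; 'none' = the early 'return FULL' fired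
def pvInnerBF : Nat → List Int → Int → Int → PySem.Set Int → Option (PySem.Set Int)
  | 0, _, _, _, sums => some sums
  | fuel + 1, vals, a, lo, sums =>
    if lo < (vals.length : Int) ∧ PySem.List.pyGetD vals lo 0 ≤ 10000 - a then
      if ((PySem.Set.add sums (a + PySem.List.pyGetD vals lo 0)).length : Int) = 20001 then none
      else pvInnerBF fuel vals a (lo + 1) (PySem.Set.add sums (a + PySem.List.pyGetD vals lo 0))
    else some sums

def pvInnerB (vals : List Int) (a lo : Int) (sums : PySem.Set Int) : Option (PySem.Set Int) :=
  pvInnerBF ((vals.length : Int) - lo).toNat vals a lo sums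

-- outer 'for i in range(n)'
def pvOuterBF : Nat → List Int → Int → PySem.Set Int → Int
  | 0, _, _, sums => (sums.length : Int)
  | fuel + 1, vals, i, sums =>
    if i < (vals.length : Int) then
      match pvInnerB vals (PySem.List.pyGetD vals i 0)
          (pvBisect vals (-10000 - PySem.List.pyGetD vals i 0) (i + 1) (vals.length : Int)) sums with
      | none => 20001
      | some s' => pvOuterBF fuel vals (i + 1) s'
    else (sums.length : Int)

def pvOuterB (vals : List Int) (i : Int) (sums : PySem.Set Int) : Int :=
  pvOuterBF ((vals.length : Int) - i).toNat vals i sums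

def solution_alt (A : List Int) : Int :=
  pvOuterB (PySem.List.sorted (PySem.Set.ofList A) (fun x => x) false) 0 PySem.Set.empty

-- ===== PRECONDITION & SPEC =====
def Spec_solution (A : List Int) (out : Int) : Prop := out = solution_alt A
instance (A : List Int) (out : Int) : Decidable (Spec_solution A out) := by unfold Spec_solution; infer_instance

-- ===== CLAIM (what is proved, stated in full; the proofs are below) =====
def Claim_equal_solution : Prop := ∀ (A : List Int), Dom_solution A → Spec_solution A (solution A)

-- ===== LEMMAS AND PROOFS =====

-- 't is achievable as a sum of two distinct elements of l'
def pvAchB (l : List Int) (t : Int) : Bool :=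
  l.any fun a => l.any fun b => a != b && a + b == t

-- the value both programs compute: how many of the 20001 targets are achievable
def pvCount (l : List Int) : Int :=
  ((PySem.List.pyRange (-10000) (10000 + 1) 1).countP (pvAchB l) : Int)

theorem pvAchB_iff (l : List Int) (t : Int) :
    pvAchB l t = true ↔ ∃ a ∈ l, ∃ b ∈ l, a ≠ b ∧ a + b = t := by
  simp [pvAchB]

theorem pvInnerA_eq_true_iff (hs : PySem.Set Int) (t : Int) (l : List Int) :
    pvInnerA hs t l = true ↔ ∃ a ∈ l, 2 * a ≠ t ∧ (t - a) ∈ hs := by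
  induction l with
  | nil => simp [pvInnerA]
  | cons a rest ih =>
      simp only [pvInnerA]
      split_ifs with h
      · simp [h]
      · simp [ih, h]

-- A computes pvCount of its set
theorem pvInnerA_eq_pvAchB (hs : PySem.Set Int) (t : Int) :
    pvInnerA hs t hs = pvAchB hs t := by
  rw [Bool.eq_iff_iff, pvInnerA_eq_true_iff, pvAchB_iff]
  constructor
  · rintro ⟨a, ha, hne, hb⟩
    exact ⟨a, ha, t - a, hb, by omega, by omega⟩
  · rintro ⟨a, ha, b, hb, hne, he⟩
    exact ⟨a, ha, by omega, by rw [show t - a = b by omega]; exact hb⟩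

theorem solution_eq_pvCount (A : List Int) :
    solution A = pvCount (PySem.Set.ofList A) := by
  unfold solution
  set S : PySem.Set Int := PySem.Set.ofList A with hS
  rw [PySem.List.foldl_if_add_one, zero_add]
  unfold pvCount
  exact congrArg _ (List.countP_congr (fun t _ => by rw [pvInnerA_eq_pvAchB S t]))

-- index pairs vs distinct element pairs, for a Nodup list
theorem pvPairs_iff (l : List Int) (hn : l.Nodup) (x : Int) :
    (∃ p q : Nat, ∃ hq : q < l.length, ∃ _ : p < q, l[p]'(by omega) + l[q] = x) ↔
      ∃ a ∈ l, ∃ b ∈ l, a ≠ b ∧ a + b = x := by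
  constructor
  · rintro ⟨p, q, hq, hpq, he⟩
    exact ⟨l[p], List.getElem_mem _, l[q], List.getElem_mem _,
      fun h => absurd ((List.Nodup.getElem_inj_iff hn).mp h) (by omega), he⟩
  · rintro ⟨a, ha, b, hb, hne, he⟩
    obtain ⟨p, hp, rfl⟩ := List.getElem_of_mem ha
    obtain ⟨q, hq, rfl⟩ := List.getElem_of_mem hb
    have hpq : p ≠ q := fun h => hne (by subst h; rfl)
    rcases Nat.lt_or_ge p q with h | h
    · exact ⟨p, q, hq, h, he⟩
    · exact ⟨q, p, hp, by omega, by omega⟩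

-- monotone access on a strictly sorted list
theorem pvSorted_le (l : List Int) (hs : l.Pairwise (· < ·)) (p q : Nat)
    (hq : q < l.length) (hpq : p ≤ q) : l[p]'(by omega) ≤ l[q] := by
  rcases Nat.lt_or_ge p q with h | h
  · exact le_of_lt ((List.pairwise_iff_getElem.mp hs) p q (by omega) hq h)
  · have : p = q := by omega
    subst this; rfl

theorem pvGetE (vals : List Int) (j : Int) (h0 : 0 ≤ j) (h1 : j < (vals.length : Int)) :
    PySem.List.pyGetD vals j 0 = vals[j.toNat]'(by omega) := by
  rw [PySem.List.pyGetD_of_nonneg _ _ h0]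
  exact List.getD_eq_getElem _ _ (by omega)

theorem pvBisect_spec (vals : List Int) (hs : vals.Pairwise (· < ·)) (target : Int) :
    ∀ lo hi : Int, 0 ≤ lo → lo ≤ hi → hi ≤ (vals.length : Int) →
      lo ≤ pvBisect vals target lo hi ∧ pvBisect vals target lo hi ≤ hi ∧
      (∀ k : Nat, lo ≤ (k : Int) → (k : Int) < pvBisect vals target lo hi →
        ∀ hk : k < vals.length, vals[k] < target) ∧
      (∀ k : Nat, pvBisect vals target lo hi ≤ (k : Int) → (k : Int) < hi →
        ∀ hk : k < vals.length, target ≤ vals[k]) := by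
  suffices H : ∀ (m : Nat) (lo hi : Int), (hi - lo).toNat ≤ m → 0 ≤ lo → lo ≤ hi →
      hi ≤ (vals.length : Int) →
      lo ≤ pvBisectF m vals target lo hi ∧ pvBisectF m vals target lo hi ≤ hi ∧
      (∀ k : Nat, lo ≤ (k : Int) → (k : Int) < pvBisectF m vals target lo hi →
        ∀ hk : k < vals.length, vals[k] < target) ∧
      (∀ k : Nat, pvBisectF m vals target lo hi ≤ (k : Int) → (k : Int) < hi →
        ∀ hk : k < vals.length, target ≤ vals[k]) by
    intro lo hi h0 h1 h2
    exact H (hi - lo).toNat lo hi le_rfl h0 h1 h2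
  intro m
  induction m with
  | zero =>
      intro lo hi hm h0 h1 h2
      simp only [pvBisectF]
      exact ⟨le_rfl, h1, fun k hk1 hk2 hk => by omega, fun k hk1 hk2 hk => by omega⟩
  | succ m ih =>
      intro lo hi hm h0 h1 h2
      simp only [pvBisectF]
      by_cases h : lo < hi
      · rw [if_pos h]
        have hmid := PySem.Int.floordiv_two_mid_bounds (le_of_lt h)
        have hmidlt : PySem.Int.floordiv (lo + hi) 2 < hi :=
          (PySem.Int.floordiv_lt_iff_lt_mul (by omega)).mpr (by omega)
        set mid := PySem.Int.floordiv (lo + hi) 2 with hmiddef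
        have hg : PySem.List.pyGetD vals mid 0 = vals[mid.toNat]'(by omega) :=
          pvGetE vals mid (by omega) (by omega)
        by_cases hc : PySem.List.pyGetD vals mid 0 < target
        · rw [if_pos hc]
          obtain ⟨r1, r2, reg1, reg2⟩ := ih (mid + 1) hi (by omega) (by omega) (by omega) h2
          refine ⟨by omega, r2, ?_, reg2⟩
          intro k hk1 hk2 hk
          by_cases hkm : (k : Int) ≤ mid
          · have hle : vals[k] ≤ vals[mid.toNat]'(by omega) :=
              pvSorted_le vals hs k mid.toNat (by omega) (by omega)
            rw [hg] at hc
            omega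
          · exact reg1 k (by omega) hk2 hk
        · rw [if_neg hc]
          obtain ⟨r1, r2, reg1, reg2⟩ := ih lo mid (by omega) h0 (by omega) (by omega)
          refine ⟨r1, by omega, reg1, ?_⟩
          intro k hk1 hk2 hk
          by_cases hkm : (k : Int) < mid
          · exact reg2 k hk1 hkm hk
          · have hle : vals[mid.toNat]'(by omega) ≤ vals[k] :=
              pvSorted_le vals hs mid.toNat k hk (by omega)
            rw [hg] at hc
            omega
      · rw [if_neg h]
        exact ⟨le_rfl, h1, fun k hk1 hk2 hk => by omega, fun k hk1 hk2 hk => by omega⟩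

-- inner-loop spec
theorem pvInnerB_spec (vals : List Int) (hs : vals.Pairwise (· < ·)) (a : Int) (ha : a ∈ vals) :
    ∀ (m : Nat) (lo : Int) (sums : PySem.Set Int), ((vals.length : Int) - lo).toNat ≤ m →
      0 ≤ lo →
      (∀ k : Nat, lo ≤ (k : Int) → ∀ hk : k < vals.length, -10000 - a ≤ vals[k]) →
      (∀ k : Nat, lo ≤ (k : Int) → ∀ hk : k < vals.length, a < vals[k]) →
      sums.Nodup →
      (∀ x ∈ sums, (-10000 ≤ x ∧ x ≤ 10000) ∧ pvAchB vals x = true) →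
      (∀ s', pvInnerBF m vals a lo sums = some s' →
        s'.Nodup ∧
        (∀ x ∈ s', (-10000 ≤ x ∧ x ≤ 10000) ∧ pvAchB vals x = true) ∧
        (∀ x, x ∈ s' ↔ x ∈ sums ∨
          ∃ k : Nat, ∃ hk : k < vals.length, lo ≤ (k : Int) ∧ vals[k] ≤ 10000 - a ∧ a + vals[k] = x)) ∧
      (pvInnerBF m vals a lo sums = none →
        ∃ s'' : List Int, s''.Nodup ∧
          (∀ x ∈ s'', (-10000 ≤ x ∧ x ≤ 10000) ∧ pvAchB vals x = true) ∧
          s''.length = 20001) := by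
  intro m
  induction m with
  | zero =>
      intro lo sums hm h0 hlow hgt hnd hsub
      simp only [pvInnerBF]
      refine ⟨?_, by intro h; cases h⟩
      intro s' hsome
      obtain rfl : sums = s' := by injection hsome
      refine ⟨hnd, hsub, fun x => ?_⟩
      constructor
      · exact fun h => Or.inl h
      · rintro (h | ⟨k, hk, hk1, _, _⟩)
        · exact h
        · omega
  | succ m ih =>
      intro lo sums hm h0 hlow hgt hnd hsub
      simp only [pvInnerBF]
      by_cases hcond : lo < (vals.length : Int) ∧ PySem.List.pyGetD vals lo 0 ≤ 10000 - a
      · have hlolen : lo.toNat < vals.length := by omega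
        have hg : PySem.List.pyGetD vals lo 0 = vals[lo.toNat] :=
          pvGetE vals lo (by omega) (by omega)
        set s1 := PySem.Set.add sums (a + PySem.List.pyGetD vals lo 0) with hs1
        have hnd1 : s1.Nodup := PySem.Set.nodup_add sums _ hnd
        have hsub1 : ∀ x ∈ s1, (-10000 ≤ x ∧ x ≤ 10000) ∧ pvAchB vals x = true := by
          intro x hx
          rcases (PySem.Set.mem_add sums _ x).mp hx with hx | hx
          · exact hsub x hx
          · have hlo1 := hlow lo.toNat (by omega) hlolen
            have hlo2 := hcond.2
            rw [hg] at hlo2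
            have hlo3 := hgt lo.toNat (by omega) hlolen
            refine ⟨⟨by omega, by omega⟩, ?_⟩
            rw [pvAchB_iff]
            exact ⟨a, ha, vals[lo.toNat], List.getElem_mem _, by omega, by omega⟩
        by_cases hfull : ((s1.length : Int) = 20001)
        · rw [if_pos hcond, if_pos hfull]
          exact ⟨(fun s' h => nomatch h), fun _ => ⟨s1, hnd1, hsub1, by omega⟩⟩
        · rw [if_pos hcond, if_neg hfull]
          obtain ⟨hsome, hnone⟩ := ih (lo + 1) s1 (by omega) (by omega)
            (fun k hk1 hk => hlow k (by omega) hk)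
            (fun k hk1 hk => hgt k (by omega) hk) hnd1 hsub1
          refine ⟨?_, hnone⟩
          intro s' hres
          obtain ⟨n1, n2, n3⟩ := hsome s' hres
          refine ⟨n1, n2, fun x => ?_⟩
          rw [n3 x, PySem.Set.mem_add]
          constructor
          · rintro ((hx | hx) | ⟨k, hk, hk1, hk2, hk3⟩)
            · exact Or.inl hx
            · refine Or.inr ⟨lo.toNat, hlolen, by omega, by omega, by omega⟩
            · exact Or.inr ⟨k, hk, by omega, hk2, hk3⟩
          · rintro (hx | ⟨k, hk, hk1, hk2, hk3⟩)
            · exact Or.inl (Or.inl hx)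
            · by_cases hklo : (k : Int) = lo
              · refine Or.inl (Or.inr ?_)
                have hkk : k = lo.toNat := by omega
                subst hkk
                omega
              · exact Or.inr ⟨k, hk, by omega, hk2, hk3⟩
      · rw [if_neg hcond]
        refine ⟨?_, by intro h; cases h⟩
        intro s' hsome
        obtain rfl : sums = s' := by injection hsome
        refine ⟨hnd, hsub, fun x => ?_⟩
        constructor
        · exact fun h => Or.inl h
        · rintro (h | ⟨k, hk, hk1, hk2, hk3⟩)
          · exact h
          · rcases not_and_or.mp hcond with h1 | h1
            · omega
            · push_neg at h1
              rw [pvGetE vals lo (by omega) (by omega)] at h1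
              have hle : vals[lo.toNat]'(by omega) ≤ vals[k] :=
                pvSorted_le vals hs lo.toNat k hk (by omega)
              omega

-- when 20001 distinct achievable in-range values exist, every target is achievable
theorem pvFull_count (l : List Int) (s'' : List Int) (hn : s''.Nodup)
    (hsub : ∀ x ∈ s'', (-10000 ≤ x ∧ x ≤ 10000) ∧ pvAchB l x = true)
    (hlen : s''.length = 20001) : pvCount l = 20001 := by
  unfold pvCount
  set R := PySem.List.pyRange (-10000) (10000 + 1) 1 with hR
  have hsubR : s'' ⊆ R.filter (pvAchB l) := by
    intro x hx
    rcases hsub x hx with ⟨⟨h1, h2⟩, h3⟩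
    rw [List.mem_filter]
    exact ⟨PySem.List.mem_pyRange_one.mpr ⟨by omega, by omega⟩, h3⟩
  have l1 : 20001 ≤ (R.filter (pvAchB l)).length := hlen ▸ (hn.subperm hsubR).length_le
  have l2 : (R.filter (pvAchB l)).length ≤ R.length :=
    (List.filter_sublist : ((R.filter (pvAchB l))).Sublist R).length_le
  have hRlen : R.length = 20001 := by
    rw [hR, PySem.List.length_pyRange_one]
    decide
  rw [List.countP_eq_length_filter]
  omega

-- outer-loop spec
-- once every index below i has been processed, |sums| is the answer
theorem pvSumsDone (vals : List Int) (hs : vals.Pairwise (· < ·)) (i : Int)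
    (sums : PySem.Set Int) (hge : (vals.length : Int) ≤ i) (hnd : sums.Nodup)
    (hinv : ∀ x, x ∈ sums ↔ (-10000 ≤ x ∧ x ≤ 10000) ∧
      ∃ p q : Nat, ∃ hq : q < vals.length, ∃ _ : p < q, (p : Int) < i ∧ vals[p]'(by omega) + vals[q] = x) :
    (sums.length : Int) = pvCount vals := by
  have hndv : vals.Nodup := hs.imp (fun h => ne_of_lt h)
  have hperm : sums.Perm ((PySem.List.pyRange (-10000) (10000 + 1) 1).filter (pvAchB vals)) := by
        rw [List.perm_ext_iff_of_nodup hnd (List.Nodup.filter _ (PySem.List.nodup_pyRange_one _ _))]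
        intro x
        rw [hinv x, List.mem_filter]
        constructor
        · rintro ⟨⟨h1, h2⟩, p, q, hq, hpq, hpi, he⟩
          refine ⟨PySem.List.mem_pyRange_one.mpr ⟨by omega, by omega⟩, ?_⟩
          rw [pvAchB_iff]
          exact (pvPairs_iff vals hndv x).mp ⟨p, q, hq, hpq, he⟩
        · rintro ⟨hmem, hach⟩
          have hb := PySem.List.mem_pyRange_one.mp hmem
          obtain ⟨p, q, hq, hpq, he⟩ := (pvPairs_iff vals hndv x).mpr ((pvAchB_iff vals x).mp hach)
          exact ⟨⟨by omega, by omega⟩, p, q, hq, hpq, by omega, he⟩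
  rw [hperm.length_eq]
  unfold pvCount
  rw [List.countP_eq_length_filter]

theorem pvOuterBF_spec (vals : List Int) (hs : vals.Pairwise (· < ·)) :
    ∀ (m : Nat) (i : Int) (sums : PySem.Set Int), ((vals.length : Int) - i).toNat ≤ m →
      0 ≤ i → sums.Nodup →
      (∀ x, x ∈ sums ↔ (-10000 ≤ x ∧ x ≤ 10000) ∧
        ∃ p q : Nat, ∃ hq : q < vals.length, ∃ _ : p < q, (p : Int) < i ∧ vals[p]'(by omega) + vals[q] = x) →
      pvOuterBF m vals i sums = pvCount vals := by
  have hndv : vals.Nodup := hs.imp (fun h => ne_of_lt h)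
  intro m
  induction m with
  | zero =>
      intro i sums hm h0 hnd hinv
      simp only [pvOuterBF]
      exact pvSumsDone vals hs i sums (by omega) hnd hinv
  | succ m ih =>
      intro i sums hm h0 hnd hinv
      simp only [pvOuterBF]
      by_cases hi : i < (vals.length : Int)
      swap
      · rw [if_neg hi]
        exact pvSumsDone vals hs i sums (by omega) hnd hinv
      rw [if_pos hi]
      have hitlen : i.toNat < vals.length := by omega
      generalize hadef : PySem.List.pyGetD vals i 0 = a
      have hga : a = vals[i.toNat] := by rw [← hadef]; exact pvGetE vals i (by omega) (by omega)
      have ha : a ∈ vals := by rw [hga]; exact List.getElem_mem _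
      obtain ⟨b1, b2, breg1, breg2⟩ :=
        pvBisect_spec vals hs (-10000 - a) (i + 1) (vals.length : Int) (by omega) (by omega) le_rfl
      set lo0 := pvBisect vals (-10000 - a) (i + 1) (vals.length : Int) with hlo0
      have hlow : ∀ k : Nat, lo0 ≤ (k : Int) → ∀ hk : k < vals.length, -10000 - a ≤ vals[k] :=
        fun k hk1 hk => breg2 k hk1 (by omega) hk
      have hgt : ∀ k : Nat, lo0 ≤ (k : Int) → ∀ hk : k < vals.length, a < vals[k] := by
        intro k hk1 hk
        rw [hga]
        exact (List.pairwise_iff_getElem.mp hs) i.toNat k (by omega) hk (by omega)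
      have hsub : ∀ x ∈ sums, (-10000 ≤ x ∧ x ≤ 10000) ∧ pvAchB vals x = true := by
        intro x hx
        rcases (hinv x).mp hx with ⟨hr, p, q, hq, hpq, hpi, he⟩
        refine ⟨hr, ?_⟩
        rw [pvAchB_iff]
        exact (pvPairs_iff vals hndv x).mp ⟨p, q, hq, hpq, he⟩
      obtain ⟨hsome, hnone⟩ := pvInnerB_spec vals hs a ha (((vals.length : Int) - lo0).toNat)
        lo0 sums le_rfl (by omega) hlow hgt hnd hsub
      cases hres : pvInnerB vals a lo0 sums with
      | none =>
          obtain ⟨s'', n1, n2, n3⟩ := hnone hres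
          exact (pvFull_count vals s'' n1 n2 n3).symm
      | some s' =>
          obtain ⟨n1, n2, n3⟩ := hsome s' hres
          apply ih (i + 1) s' (by omega) (by omega) n1
          intro x
          rw [n3 x]
          constructor
          · rintro (hx | ⟨k, hk, hk1, hk2, hk3⟩)
            · rcases (hinv x).mp hx with ⟨hr, p, q, hq, hpq, hpi, he⟩
              exact ⟨hr, p, q, hq, hpq, by omega, he⟩
            · have hl := hlow k hk1 hk
              refine ⟨⟨by omega, by omega⟩, i.toNat, k, hk, by omega, by omega, ?_⟩
              rw [show vals[i.toNat] = a from hga.symm]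
              exact hk3
          · rintro ⟨hr, p, q, hq, hpq, hpi, he⟩
            by_cases hpi' : (p : Int) < i
            · exact Or.inl ((hinv x).mpr ⟨hr, p, q, hq, hpq, hpi', he⟩)
            · have hp : p = i.toNat := by omega
              subst hp
              have hq0 : lo0 ≤ (q : Int) := by
                by_contra hqlt
                have := breg1 q (by omega) (by omega) hq
                omega
              exact Or.inr ⟨q, hq, hq0, by omega, by omega⟩

theorem pvOuterB_spec (vals : List Int) (hs : vals.Pairwise (· < ·)) (i : Int)
    (sums : PySem.Set Int) (h0 : 0 ≤ i) (hnd : sums.Nodup)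
    (hinv : ∀ x, x ∈ sums ↔ (-10000 ≤ x ∧ x ≤ 10000) ∧
      ∃ p q : Nat, ∃ hq : q < vals.length, ∃ _ : p < q, (p : Int) < i ∧ vals[p]'(by omega) + vals[q] = x) :
    pvOuterB vals i sums = pvCount vals :=
  pvOuterBF_spec vals hs (((vals.length : Int) - i).toNat) i sums le_rfl h0 hnd hinv

theorem solution_spec' (A : List Int) : solution A = solution_alt A := by
  unfold solution_alt
  set vals := PySem.List.sorted (PySem.Set.ofList A) (fun x => x) false with hv
  have hs : vals.Pairwise (· < ·) := PySem.List.sorted_ofList_pairwise_lt A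
  rw [solution_eq_pvCount A]
  rw [pvOuterB_spec vals hs 0 PySem.Set.empty le_rfl List.nodup_nil ?_]
  · unfold pvCount
    refine congrArg _ (List.countP_congr fun t _ => ?_)
    rw [pvAchB_iff, pvAchB_iff]
    constructor
    · rintro ⟨x, hx, y, hy, hne, he⟩
      exact ⟨x, (PySem.List.mem_sorted _ _ _ x).mpr hx, y, (PySem.List.mem_sorted _ _ _ y).mpr hy, hne, he⟩
    · rintro ⟨x, hx, y, hy, hne, he⟩
      exact ⟨x, (PySem.List.mem_sorted _ _ _ x).mp hx, y, (PySem.List.mem_sorted _ _ _ y).mp hy, hne, he⟩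
  · intro x
    constructor
    · intro h; cases h
    · rintro ⟨_, p, q, hq, hpq, hpi, he⟩
      omega

-- ===== VERDICT (by name: the statement is the Claim_ definition above) =====
theorem solution_spec : Claim_equal_solution := by
  intro A _
  unfold Spec_solution
  exact solution_spec' A
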